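-- pv_equiv track=rewrite | github.com/dev-ojh/TIL | SWEA/D4/SWEA4366.py | check_t
-- ===== SOURCE A (Python) =====
-- def check_t(arr):
--     result = []
--     for i in range(len(arr)):
--         arr[i] = (arr[i] + 1) % 3
--         val = 0
--         for j in range(len(arr)):
--             val += 3**(len(arr)-1-j)*arr[j]
--         result.append(val)
--         arr[i] = (arr[i] + 1) % 3
--         val = 0
--         for j in range(len(arr)):
--             val += 3 ** (len(arr) - 1 - j) * arr[j]
--         result.append(val)
--         arr[i] = (arr[i] + 1) % 3
--
--     return result
-- ===== SOURCE B (Python) =====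
-- def check_t(arr):
--     # Horner base value computed once, then O(1) incremental digit-change deltas per index.
--     v = 0
--     for x in arr:
--         v = v * 3 + x
--     w = 3 ** len(arr)
--     res = []
--     for x in arr:
--         w //= 3
--         res.append(v + w * ((x + 1) % 3 - x))
--         res.append(v + w * ((x + 2) % 3 - x))
--         v += w * (x % 3 - x)
--     return res
-- ===== Notes on version B (the rewrite author's own statement) =====
-- stated objective: faster
-- what changed: B computes the base-3 valuation once by Horner's rule and derives each of the 2n results by an O(1) weighted digit-change delta, instead of A's full revaluation of the array after every in-place digit edit.
import Mathlib
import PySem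

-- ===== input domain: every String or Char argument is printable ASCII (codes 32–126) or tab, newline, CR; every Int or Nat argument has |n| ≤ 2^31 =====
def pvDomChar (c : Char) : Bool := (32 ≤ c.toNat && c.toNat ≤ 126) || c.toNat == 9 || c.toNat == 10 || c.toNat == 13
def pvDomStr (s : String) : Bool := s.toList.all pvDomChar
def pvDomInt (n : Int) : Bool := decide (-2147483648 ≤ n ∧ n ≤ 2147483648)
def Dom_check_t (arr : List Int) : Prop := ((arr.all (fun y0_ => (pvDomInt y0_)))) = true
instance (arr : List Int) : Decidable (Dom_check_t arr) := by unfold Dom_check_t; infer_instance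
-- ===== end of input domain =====

-- B computes the base-3 valuation once (Horner) and derives each result by an O(1) weighted digit delta,
-- instead of A's full revaluation after every in-place digit edit; the equivalence proved is about the
-- RETURN value only (Python A mutates its argument, leaving arr[i] replaced by arr[i] % 3; B does not).

-- ===== PORT A =====
-- the inner 'for j in range(len(arr)): val += 3**(len(arr)-1-j)*arr[j]' loop
def check_t_inner (a : List Int) : Int :=
  (PySem.List.pyRange 0 (a.length : Int) 1).foldl
    (fun val j => val + 3 ^ (((a.length : Int) - 1 - j).toNat) * PySem.List.pyGetD a j 0) 0

def check_t (arr : List Int) : List Int :=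
  ((PySem.List.pyRange 0 (arr.length : Int) 1).foldl
    (fun (st : List Int × List Int) (i : Int) =>
      let a := PySem.List.pySetD st.1 i (PySem.Int.mod (PySem.List.pyGetD st.1 i 0 + 1) 3)
      let result := st.2 ++ [check_t_inner a]
      let a := PySem.List.pySetD a i (PySem.Int.mod (PySem.List.pyGetD a i 0 + 1) 3)
      let result := result ++ [check_t_inner a]
      let a := PySem.List.pySetD a i (PySem.Int.mod (PySem.List.pyGetD a i 0 + 1) 3)
      (a, result))
    (arr, ([] : List Int))).2

-- ===== PORT B =====
def check_t_alt (arr : List Int) : List Int :=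
  let v0 : Int := arr.foldl (fun v x => v * 3 + x) 0
  (arr.foldl
    (fun (st : Int × Int × List Int) (x : Int) =>
      let w := PySem.Int.floordiv st.2.1 3
      let res := st.2.2 ++ [st.1 + w * (PySem.Int.mod (x + 1) 3 - x)]
      let res := res ++ [st.1 + w * (PySem.Int.mod (x + 2) 3 - x)]
      (st.1 + w * (PySem.Int.mod x 3 - x), w, res))
    (v0, (3 : Int) ^ arr.length, ([] : List Int))).2.2

-- ===== PRECONDITION & SPEC =====
def Spec_check_t (arr : List Int) (out : List Int) : Prop := out = check_t_alt arr
instance (arr : List Int) (out : List Int) : Decidable (Spec_check_t arr out) := by unfold Spec_check_t; infer_instance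

-- ===== CLAIM (what is proved, stated in full; the proofs are below) =====
def Claim_equal_check_t : Prop := ∀ (arr : List Int), Dom_check_t arr → Spec_check_t arr (check_t arr)

-- ===== LEMMAS AND PROOFS =====

-- Horner value of a digit list (the base-3 valuation both programs compute)
def hval (l : List Int) : Int := l.foldl (fun v x => v * 3 + x) 0

theorem foldl_hf_shift (l : List Int) : ∀ v : Int,
    l.foldl (fun v x => v * 3 + x) v = v * 3 ^ l.length + hval l := by
  induction l with
  | nil => intro v; simp [hval]
  | cons x t ih =>
    intro v
    have hx : hval (x :: t) = x * 3 ^ t.length + hval t := by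
      simp only [hval, List.foldl_cons]
      simpa using ih x
    simp only [List.foldl_cons, ih (v * 3 + x), hx, List.length_cons]
    ring

theorem hval_mid (p t : List Int) (x y : Int) :
    hval (p ++ y :: t) = hval (p ++ x :: t) + 3 ^ t.length * (y - x) := by
  have h : ∀ z : Int, hval (p ++ z :: t) = (hval p * 3 + z) * 3 ^ t.length + hval t := by
    intro z
    simp only [hval, List.foldl_append, List.foldl_cons]
    rw [show List.foldl (fun v x => v * 3 + x) 0 p = hval p from rfl, foldl_hf_shift]
    rfl
  rw [h x, h y]; ring

theorem inner_gen (a : List Int) : ∀ s : Int,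
    (List.range a.length).foldl
      (fun val k => val + 3 ^ (a.length - 1 - k) * a.getD k 0) s = s + hval a := by
  induction a with
  | nil => intro s; simp [hval]
  | cons x t ih =>
    intro s
    have hx : hval (x :: t) = x * 3 ^ t.length + hval t := by
      simp only [hval, List.foldl_cons]
      simpa using foldl_hf_shift t x
    rw [List.length_cons, List.range_succ_eq_map, List.foldl_cons, List.foldl_map]
    have hfun : (fun (val : Int) (k : ℕ) =>
        val + 3 ^ (t.length + 1 - 1 - k.succ) * (x :: t).getD k.succ 0)
        = (fun (val : Int) (k : ℕ) => val + 3 ^ (t.length - 1 - k) * t.getD k 0) := by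
      funext val k
      have he : t.length + 1 - 1 - k.succ = t.length - 1 - k := by omega
      rw [he, List.getD_cons_succ]
    rw [hfun, ih]
    simp only [List.getD_cons_zero, hx]
    have he' : t.length + 1 - 1 - 0 = t.length := by omega
    rw [he']; ring

theorem inner_eq_hval (a : List Int) : check_t_inner a = hval a := by
  unfold check_t_inner
  rw [PySem.List.pyRange_one, List.foldl_map]
  have hn : (((a.length : Int) - 0).toNat) = a.length := by omega
  rw [hn]
  have hcong : (List.range a.length).foldl
      (fun val (k : ℕ) => val + 3 ^ ((((a.length : Int)) - 1 - (0 + (k : Int))).toNat)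
        * PySem.List.pyGetD a (0 + (k : Int)) 0) 0
      = (List.range a.length).foldl
      (fun val (k : ℕ) => val + 3 ^ (a.length - 1 - k) * a.getD k 0) 0 := by
    apply PySem.List.foldl_congr_mem
    intro acc k hk
    have hk' : k < a.length := List.mem_range.mp hk
    have h0 : (0 : Int) + (k : Int) = ((k : ℕ) : Int) := by omega
    rw [h0, PySem.List.pyGetD_natCast]
    have he : (((a.length : Int)) - 1 - ((k : ℕ) : Int)).toNat = a.length - 1 - k := by omega
    rw [he]
  rw [hcong, inner_gen]
  ring

theorem getD_mid (p : List Int) (t : List Int) (x : Int) :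
    (p ++ x :: t).getD p.length 0 = x := by
  induction p with
  | nil => simp
  | cons y p ih => simp [ih]

theorem set_mid (p : List Int) (t : List Int) (x y : Int) :
    (p ++ x :: t).set p.length y = p ++ y :: t := by
  induction p with
  | nil => simp
  | cons z p ih => simpa using ih

theorem floordiv_pow3 (m : ℕ) : PySem.Int.floordiv ((3 : Int) ^ (m + 1)) 3 = 3 ^ m := by
  rw [PySem.Int.floordiv_eq_ediv_of_pos (by norm_num), pow_succ]
  exact Int.mul_ediv_cancel _ (by norm_num)

theorem mod3_succ (x : Int) :
    PySem.Int.mod (PySem.Int.mod x 3 + 1) 3 = PySem.Int.mod (x + 1) 3 := by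
  rw [PySem.Int.mod_eq_emod_of_pos (by norm_num), PySem.Int.mod_eq_emod_of_pos (by norm_num),
    PySem.Int.mod_eq_emod_of_pos (by norm_num)]
  omega

theorem mod3_add3 (x : Int) : PySem.Int.mod (x + 3) 3 = PySem.Int.mod x 3 := by
  rw [PySem.Int.mod_eq_emod_of_pos (by norm_num), PySem.Int.mod_eq_emod_of_pos (by norm_num)]
  omega

-- the loop bodies of the two ports, named for the proofs (identical to the lambdas in the ports)
def Astep (st : List Int × List Int) (i : Int) : List Int × List Int :=
  let a := PySem.List.pySetD st.1 i (PySem.Int.mod (PySem.List.pyGetD st.1 i 0 + 1) 3)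
  let result := st.2 ++ [check_t_inner a]
  let a := PySem.List.pySetD a i (PySem.Int.mod (PySem.List.pyGetD a i 0 + 1) 3)
  let result := result ++ [check_t_inner a]
  let a := PySem.List.pySetD a i (PySem.Int.mod (PySem.List.pyGetD a i 0 + 1) 3)
  (a, result)

def Bstep (st : Int × Int × List Int) (x : Int) : Int × Int × List Int :=
  let w := PySem.Int.floordiv st.2.1 3
  let res := st.2.2 ++ [st.1 + w * (PySem.Int.mod (x + 1) 3 - x)]
  let res := res ++ [st.1 + w * (PySem.Int.mod (x + 2) 3 - x)]
  (st.1 + w * (PySem.Int.mod x 3 - x), w, res)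

theorem loop_eq (t : List Int) : ∀ (p res : List Int),
    ((PySem.List.pyRange (p.length : Int) ((p.length + t.length : ℕ) : Int) 1).foldl
        Astep (p ++ t, res)).2
    = (t.foldl Bstep (hval (p ++ t), (3 : Int) ^ t.length, res)).2.2 := by
  induction t with
  | nil =>
    intro p res
    rw [PySem.List.pyRange_one_eq_nil (by simp)]
    simp
  | cons x t ih =>
    intro p res
    have hlt : (p.length : Int) < ((p.length + (x :: t).length : ℕ) : Int) := by
      simp only [List.length_cons]; push_cast; omega
    rw [PySem.List.pyRange_one_cons hlt, List.foldl_cons]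
    have hstep : Astep (p ++ x :: t, res) (p.length : Int)
        = (p ++ PySem.Int.mod x 3 :: t,
           (res ++ [hval (p ++ x :: t) + 3 ^ t.length * (PySem.Int.mod (x + 1) 3 - x)])
             ++ [hval (p ++ x :: t) + 3 ^ t.length * (PySem.Int.mod (x + 2) 3 - x)]) := by
      unfold Astep
      simp only [PySem.List.pySetD_natCast, PySem.List.pyGetD_natCast, getD_mid, set_mid,
        inner_eq_hval, mod3_succ]
      have h2 : x + 1 + 1 = x + 2 := by ring
      have h3 : x + 2 + 1 = x + 3 := by ring
      rw [h2, h3, mod3_add3]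
      rw [hval_mid p t x (PySem.Int.mod (x + 1) 3), hval_mid p t x (PySem.Int.mod (x + 2) 3)]
    rw [hstep]
    have harr : p ++ PySem.Int.mod x 3 :: t = (p ++ [PySem.Int.mod x 3]) ++ t := by simp
    have hlen : (p.length : Int) + 1 = ((p ++ [PySem.Int.mod x 3]).length : Int) := by
      simp
    have hbound : ((p.length + (x :: t).length : ℕ) : Int)
        = (((p ++ [PySem.Int.mod x 3]).length + t.length : ℕ) : Int) := by
      simp [List.length_cons]; ring
    rw [harr, hlen, hbound, ih (p ++ [PySem.Int.mod x 3])]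
    -- B side
    rw [List.foldl_cons]
    have hB : Bstep (hval (p ++ x :: t), (3 : Int) ^ (x :: t).length, res) x
        = (hval ((p ++ [PySem.Int.mod x 3]) ++ t), (3 : Int) ^ t.length,
           (res ++ [hval (p ++ x :: t) + 3 ^ t.length * (PySem.Int.mod (x + 1) 3 - x)])
             ++ [hval (p ++ x :: t) + 3 ^ t.length * (PySem.Int.mod (x + 2) 3 - x)]) := by
      unfold Bstep
      simp only [List.length_cons, floordiv_pow3]
      rw [← harr, hval_mid p t x (PySem.Int.mod x 3)]
    rw [hB]

-- ===== VERDICT (by name: the statement is the Claim_ definition above) =====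
theorem check_t_spec : Claim_equal_check_t := by
  intro arr _
  unfold Spec_check_t check_t check_t_alt
  have h0 : ((arr.length : ℕ) : Int) = (([] : List Int).length + arr.length : ℕ) := by simp
  calc ((PySem.List.pyRange 0 (arr.length : Int) 1).foldl Astep (arr, ([] : List Int))).2
      = (arr.foldl Bstep (hval arr, (3 : Int) ^ arr.length, ([] : List Int))).2.2 := by
        have := loop_eq arr [] []
        simpa using this
    _ = (arr.foldl
          (fun (st : Int × Int × List Int) (x : Int) =>
            let w := PySem.Int.floordiv st.2.1 3
            let res := st.2.2 ++ [st.1 + w * (PySem.Int.mod (x + 1) 3 - x)]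
            let res := res ++ [st.1 + w * (PySem.Int.mod (x + 2) 3 - x)]
            (st.1 + w * (PySem.Int.mod x 3 - x), w, res))
          (arr.foldl (fun v x => v * 3 + x) 0, (3 : Int) ^ arr.length, ([] : List Int))).2.2 := rfl
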